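-- pv_equiv track=rewrite | github.com/pranitashedage1/Coding-Practice | Examples/Check - Get Max Racers.py | getMaxRacers
-- ===== SOURCE A (Python) =====
-- def getMaxRacers(speed, k):
--     from collections import defaultdict
--
--     n = len(speed)
--     max_length = 0
--     start = 0
--     frequency = defaultdict(int)
--
--     for end in range(n):
--         frequency[speed[end]] += 1
--
--         # Calculate the most frequent speed in the current window
--         most_frequent_speed_count = max(frequency.values())
--
--         # Calculate the number of removals needed to make the current window valid
--         racers_in_window = end - start + 1
--         removals_needed = racers_in_window - most_frequent_speed_count
--
--         # If removals needed exceeds k, contract the window from the start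
--         while removals_needed > k:
--             frequency[speed[start]] -= 1
--             if frequency[speed[start]] == 0:
--                 del frequency[speed[start]]
--             start += 1
--             most_frequent_speed_count = max(frequency.values())
--             racers_in_window = end - start + 1
--             removals_needed = racers_in_window - most_frequent_speed_count
--
--         # Update the maximum length of the valid window
--         max_length = max(max_length, racers_in_window)
--
--     return max_length
-- ===== SOURCE B (Python) =====
-- def getMaxRacers(speed, k):
--     n = len(speed)
--     max_length = 0
--     start = 0
--     cnt = {}    # speed -> count in the current window (zero entries may remain)
--     cc = {}     # count value -> number of speeds having exactly that count
--     maxc = 0    # max of the window counts, maintained in O(1)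
--     for end in range(n):
--         x = speed[end]
--         c = cnt.get(x, 0)
--         cnt[x] = c + 1
--         if c > 0:
--             cc[c] -= 1
--         cc[c + 1] = cc.get(c + 1, 0) + 1
--         if c + 1 > maxc:
--             maxc = c + 1
--         while end - start + 1 - maxc > k:
--             y = speed[start]
--             d = cnt[y]
--             cnt[y] = d - 1
--             cc[d] -= 1
--             if d > 1:
--                 cc[d - 1] = cc.get(d - 1, 0) + 1
--             if d == maxc and cc[d] == 0:
--                 maxc -= 1
--             start += 1
--         if end - start + 1 > max_length:
--             max_length = end - start + 1
--     return max_length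
-- ===== Notes on version B (the rewrite author's own statement) =====
-- stated objective: faster
-- what changed: B keeps the same sliding window but maintains the window's maximum speed-frequency incrementally with a count-of-counts dict (O(1) per update), instead of A's max(frequency.values()) scan recomputed on every loop step and on every shrink iteration.
import Mathlib
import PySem

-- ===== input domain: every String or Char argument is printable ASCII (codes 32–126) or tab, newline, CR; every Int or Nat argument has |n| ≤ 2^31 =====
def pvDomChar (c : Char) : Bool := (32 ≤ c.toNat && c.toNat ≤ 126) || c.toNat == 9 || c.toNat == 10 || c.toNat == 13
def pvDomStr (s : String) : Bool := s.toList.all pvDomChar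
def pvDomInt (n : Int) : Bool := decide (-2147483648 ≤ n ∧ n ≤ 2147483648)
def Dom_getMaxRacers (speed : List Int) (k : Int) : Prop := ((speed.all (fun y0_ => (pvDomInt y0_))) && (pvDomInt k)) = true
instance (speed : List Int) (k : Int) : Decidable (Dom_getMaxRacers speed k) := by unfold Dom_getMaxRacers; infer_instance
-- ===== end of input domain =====

-- B replaces A's O(window)-per-step `max(frequency.values())` scans by an O(1) count-of-counts
-- maintenance of the running maximum frequency (same sliding window, same return value).

-- ===== PORT A =====

-- `max(frequency.values())`: Python max over the dict's values (raises on an empty dict → none)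
def aMax (d : PySem.Dict Int Int) : Option Int := PySem.List.max? d.values (fun v => v)

-- the inner `while removals_needed > k` loop of A; fuel bounds the iterations (each one
-- advances `start` by 1, so `(e + 1 - start).toNat` steps are enough on every input A accepts)
def aWhile (speed : List Int) (k e : Int) :
    Nat → Int → PySem.Dict Int Int → Int → Int × PySem.Dict Int Int
  | 0, start, freq, _ => (start, freq)
  | fuel + 1, start, freq, mfc =>
    if e - start + 1 - mfc > k then
      -- frequency[speed[start]] -= 1 ; if frequency[speed[start]] == 0: del …
      let x := (PySem.List.pyGet? speed start).getD 0  -- in range on every input A accepts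
      let c := freq.getD x 0 - 1
      let freq' := if c = 0 then freq.erase x else freq.insert x c
      match aMax freq' with
      | none => (start + 1, freq')  -- Python raises ValueError here (only reachable when k < 0)
      | some m => aWhile speed k e fuel (start + 1) freq' m
    else (start, freq)

-- one iteration of `for end in range(n)`
def aStep (speed : List Int) (k : Int) (st : Int × PySem.Dict Int Int × Int) (e : Int) :
    Int × PySem.Dict Int Int × Int :=
  let start := st.1
  let freq := st.2.1
  let maxLen := st.2.2
  let x := (PySem.List.pyGet? speed e).getD 0        -- always in range
  let freq1 := freq.insert x (freq.getD x 0 + 1)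
  let mfc := (aMax freq1).getD 0                     -- dict just got an entry: max is defined
  let r := aWhile speed k e (e + 1 - start).toNat start freq1 mfc
  (r.1, r.2, max maxLen (e - r.1 + 1))

def getMaxRacers (speed : List Int) (k : Int) : Int :=
  let n : Int := speed.length
  ((PySem.List.pyRange 0 n 1).foldl (aStep speed k) (0, PySem.Dict.empty, 0)).2.2

-- ===== PORT B =====

-- state: (start, cnt, cc, maxc); the inner while loop of B (same fuel bound as A's)
def bWhile (speed : List Int) (k e : Int) :
    Nat → Int → PySem.Dict Int Int → PySem.Dict Int Int → Int →
    Int × PySem.Dict Int Int × PySem.Dict Int Int × Int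
  | 0, start, cnt, cc, maxc => (start, cnt, cc, maxc)
  | fuel + 1, start, cnt, cc, maxc =>
    if e - start + 1 - maxc > k then
      let y := (PySem.List.pyGet? speed start).getD 0     -- in range on every input B accepts
      let d := cnt.getD y 0                               -- key present on every input B accepts
      let cnt' := cnt.insert y (d - 1)
      let cc1 := cc.insert d (cc.getD d 0 - 1)            -- cc[d] -= 1 (key present inside Pre_)
      let cc2 := if d > 1 then cc1.insert (d - 1) (cc1.getD (d - 1) 0 + 1) else cc1
      let maxc' := if d = maxc ∧ cc2.getD d 0 = 0 then maxc - 1 else maxc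
      bWhile speed k e fuel (start + 1) cnt' cc2 maxc'
    else (start, cnt, cc, maxc)

-- one iteration of B's `for end in range(n)`
def bStep (speed : List Int) (k : Int)
    (st : Int × PySem.Dict Int Int × PySem.Dict Int Int × Int × Int) (e : Int) :
    Int × PySem.Dict Int Int × PySem.Dict Int Int × Int × Int :=
  let start := st.1
  let cnt := st.2.1
  let cc := st.2.2.1
  let maxc := st.2.2.2.1
  let best := st.2.2.2.2
  let x := (PySem.List.pyGet? speed e).getD 0        -- always in range
  let c := cnt.getD x 0
  let cnt1 := cnt.insert x (c + 1)
  let cc1 := if c > 0 then cc.insert c (cc.getD c 0 - 1) else cc   -- cc[c] -= 1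
  let cc2 := cc1.insert (c + 1) (cc1.getD (c + 1) 0 + 1)
  let maxc1 := if c + 1 > maxc then c + 1 else maxc
  let r := bWhile speed k e (e + 1 - start).toNat start cnt1 cc2 maxc1
  let start' := r.1
  (start', r.2.1, r.2.2.1, r.2.2.2,
    if e - start' + 1 > best then e - start' + 1 else best)

def getMaxRacers_alt (speed : List Int) (k : Int) : Int :=
  let n : Int := speed.length
  ((PySem.List.pyRange 0 n 1).foldl (bStep speed k)
    (0, PySem.Dict.empty, PySem.Dict.empty, 0, 0)).2.2.2.2

-- ===== PRECONDITION & SPEC =====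
-- Pre_ excludes exactly the inputs where A raises: for k < 0 and a nonempty list, A empties the
-- window and calls max() on an empty dict (ValueError); B raises there too (KeyError/IndexError).
def Pre_getMaxRacers (speed : List Int) (k : Int) : Prop := 0 ≤ k ∨ speed = []
instance (speed : List Int) (k : Int) : Decidable (Pre_getMaxRacers speed k) := by
  unfold Pre_getMaxRacers; infer_instance

def pvWitness_getMaxRacers : List Int × Int := ([1, 2, 1, 1, 3], 1)

def Spec_getMaxRacers (speed : List Int) (k : Int) (out : Int) : Prop := out = getMaxRacers_alt speed k
instance (speed : List Int) (k : Int) (out : Int) : Decidable (Spec_getMaxRacers speed k out) := by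
  unfold Spec_getMaxRacers; infer_instance

-- ===== CLAIM (what is proved, stated in full; the proofs are below) =====
def Claim_equal_getMaxRacers : Prop := ∀ (speed : List Int) (k : Int), Dom_getMaxRacers speed k → Pre_getMaxRacers speed k → Spec_getMaxRacers speed k (getMaxRacers speed k)

-- ===== LEMMAS AND PROOFS =====

-- number of dict entries whose value is j
def nAt (d : PySem.Dict Int Int) (j : Int) : Nat :=
  (d.items.filter (fun p => p.2 = j)).length

-- the coupling invariant between A's dict `freq` and B's (cnt, cc, maxc)
def SimInv (freq cnt cc : PySem.Dict Int Int) (maxc : Int) : Prop :=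
  freq.keys.Nodup
  ∧ (∀ x, freq.getD x 0 = cnt.getD x 0)
  ∧ (∀ j : Int, j ≤ 0 → nAt freq j = 0)
  ∧ (∀ j : Int, maxc < j → nAt freq j = 0)
  ∧ (freq.items = [] → maxc = 0)
  ∧ (freq.items ≠ [] → 0 < nAt freq maxc)
  ∧ (∀ j : Int, 1 ≤ j → cc.getD j 0 = (nAt freq j : Int))

-- the current window speed[start:m] as a list
def winL (speed : List Int) (m : Nat) (start : Int) : List Int :=
  (speed.take m).drop start.toNat


lemma mem_values_iff_nAt_pos (d : PySem.Dict Int Int) (v : Int) :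
    v ∈ d.values ↔ 0 < nAt d v := by
  rw [nAt, List.length_pos_iff]
  simp only [PySem.Dict.values, List.mem_map, ne_eq, ← List.filter_eq_nil_iff]
  constructor
  · rintro ⟨p, hp, rfl⟩ hnil
    have := List.filter_eq_nil_iff.mp hnil p hp
    simp at this
  · intro h
    by_contra hn
    push_neg at hn
    apply h
    apply List.filter_eq_nil_iff.mpr
    intro p hp
    simp only [decide_eq_true_eq]
    intro he
    exact (hn p hp he).elim

lemma get?_of_getD_ne (d : PySem.Dict Int Int) (x : Int) (h : d.getD x 0 ≠ 0) :
    d.get? x = some (d.getD x 0) := by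
  rw [PySem.Dict.getD_eq_get?_getD] at *
  cases hg : d.get? x with
  | none => simp [hg] at h
  | some v => simp [hg]

lemma getD_mem_values (d : PySem.Dict Int Int) (x : Int) (h : d.getD x 0 ≠ 0) :
    d.getD x 0 ∈ d.values := by
  have hg := get?_of_getD_ne d x h
  unfold PySem.Dict.get? at hg
  cases hfind : d.items.find? (fun p => p.1 == x) with
  | none => simp [hfind] at hg
  | some p =>
    simp [hfind] at hg
    have hmem := List.mem_of_find?_eq_some hfind
    rw [← hg]
    exact List.mem_map_of_mem hmem

lemma items_eq_nil_of_nAt (d : PySem.Dict Int Int) (h : ∀ j, nAt d j = 0) :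
    d.items = [] := by
  cases hi : d.items with
  | nil => rfl
  | cons p t =>
    have := h p.2
    simp [nAt, hi] at this

lemma getD_of_items_eq_nil (d : PySem.Dict Int Int) (h : d.items = []) (x : Int) :
    d.getD x 0 = 0 := by
  simp [PySem.Dict.getD, PySem.Dict.get?, h]

lemma insert_items_ne_nil (d : PySem.Dict Int Int) (x v : Int) :
    (d.insert x v).items ≠ [] := by
  unfold PySem.Dict.insert
  split
  · rename_i hc
    unfold PySem.Dict.contains at hc
    simp only [List.any_eq_true] at hc
    obtain ⟨p, hp, -⟩ := hc
    cases hi : d.items with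
    | nil => rw [hi] at hp; simp at hp
    | cons q t => simp [hi]
  · simp

lemma replCount (x c v j : Int) :
    ∀ l : List (Int × Int), (l.map Prod.fst).Nodup → (x, c) ∈ l →
    ((l.map (fun p => if p.1 == x then (x, v) else p)).filter (fun p => p.2 = j)).length
        + (if c = j then 1 else 0)
      = (l.filter (fun p => p.2 = j)).length + (if v = j then 1 else 0) := by
  intro l
  induction l with
  | nil => intro _ h; simp at h
  | cons p t ih =>
    intro hnd hmem
    simp only [List.map_cons, List.nodup_cons] at hnd
    rcases List.mem_cons.mp hmem with heq | hmem'
    · subst heq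
      have htid : t.map (fun p => if p.1 == x then (x, v) else p) = t := by
        rcases hnd with ⟨hp, -⟩
        calc t.map (fun p => if p.1 == x then (x, v) else p) = t.map id := by
              apply List.map_congr_left
              intro q hq
              have : (q.1 == x) = false := by
                simp only [beq_eq_false_iff_ne, ne_eq]
                intro he
                have hx1 : q.1 ∈ t.map Prod.fst := List.mem_map_of_mem hq
                rw [he] at hx1
                exact hp hx1
              simp [this]
          _ = t := List.map_id t
      simp only [List.map_cons, beq_self_eq_true, if_true, htid, List.filter_cons]
      split_ifs <;> simp_all <;> omega
    · have hxmem : x ∈ t.map Prod.fst := List.mem_map_of_mem hmem' (f := Prod.fst)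
      have hne : (p.1 == x) = false := by
        rcases hnd with ⟨hp, -⟩
        simp only [beq_eq_false_iff_ne, ne_eq]
        intro he; exact hp (he ▸ hxmem)
      simp only [List.map_cons, hne, if_neg, Bool.false_eq_true, not_false_iff, List.filter_cons]
      have := ih hnd.2 hmem'
      split_ifs <;> simp_all <;> omega

lemma delCount (x c j : Int) :
    ∀ l : List (Int × Int), (l.map Prod.fst).Nodup → (x, c) ∈ l →
    ((l.filter (fun p => !(p.1 == x))).filter (fun p => p.2 = j)).length
        + (if c = j then 1 else 0)
      = (l.filter (fun p => p.2 = j)).length := by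
  intro l
  induction l with
  | nil => intro _ h; simp at h
  | cons p t ih =>
    intro hnd hmem
    simp only [List.map_cons, List.nodup_cons] at hnd
    rcases List.mem_cons.mp hmem with heq | hmem'
    · subst heq
      have htid : t.filter (fun p => !(p.1 == x)) = t := by
        rcases hnd with ⟨hp, -⟩
        apply List.filter_eq_self.mpr
        intro q hq
        simp only [Bool.not_eq_eq_eq_not, Bool.not_true, beq_eq_false_iff_ne, ne_eq]
        intro he
        have hx1 : q.1 ∈ t.map Prod.fst := List.mem_map_of_mem hq
        rw [he] at hx1
        exact hp hx1
      simp only [List.filter_cons, beq_self_eq_true, Bool.not_true, if_false, htid]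
      split_ifs <;> simp_all
    · have hxmem : x ∈ t.map Prod.fst := List.mem_map_of_mem hmem' (f := Prod.fst)
      have hne : (p.1 == x) = false := by
        rcases hnd with ⟨hp, -⟩
        simp only [beq_eq_false_iff_ne, ne_eq]
        intro he; exact hp (he ▸ hxmem)
      have := ih hnd.2 hmem'
      simp only [List.filter_cons, hne, Bool.not_false, if_true]
      split_ifs <;> simp_all <;> omega

lemma get?_erase_self (d : PySem.Dict Int Int) (x : Int) : (d.erase x).get? x = none := by
  unfold PySem.Dict.erase PySem.Dict.get?
  simp only [Option.map_eq_none_iff, List.find?_eq_none, List.mem_filter]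
  rintro p ⟨-, hp⟩
  simpa using hp

lemma get?_erase_of_ne (d : PySem.Dict Int Int) (x y : Int) (h : y ≠ x) :
    (d.erase x).get? y = d.get? y := by
  unfold PySem.Dict.erase PySem.Dict.get?
  congr 1
  induction d.items with
  | nil => rfl
  | cons p t ih =>
    by_cases hx : p.1 = x
    · have hy : (p.1 == y) = false := by
        simp only [beq_eq_false_iff_ne, ne_eq, hx]
        exact fun he => h he.symm
      simp [List.filter_cons, hx, List.find?_cons, hy, ih, beq_eq_false_iff_ne.mpr (Ne.symm h)]
    · by_cases hyy : p.1 = y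
      · simp [List.filter_cons, hx, List.find?_cons, hyy, h]
      · simp [List.filter_cons, hx, List.find?_cons, hyy, ih]

lemma nodup_keys_erase (d : PySem.Dict Int Int) (x : Int) (h : d.keys.Nodup) :
    (d.erase x).keys.Nodup := by
  unfold PySem.Dict.erase PySem.Dict.keys at *
  exact ((List.filter_sublist (l := d.items)).map (fun p => p.1)).nodup h

lemma nAt_insert_of_not_contains (d : PySem.Dict Int Int) (x v j : Int)
    (h : d.contains x = false) :
    nAt (d.insert x v) j = nAt d j + (if v = j then 1 else 0) := by
  unfold nAt PySem.Dict.insert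
  rw [if_neg (by simp [h])]
  simp only [List.filter_append, List.length_append]
  congr 1
  simp [List.filter_cons]
  split_ifs <;> simp

lemma keys_nodup_map_fst (d : PySem.Dict Int Int) (h : d.keys.Nodup) :
    (d.items.map Prod.fst).Nodup := by
  unfold PySem.Dict.keys at h
  exact h

lemma contains_of_mem_items (d : PySem.Dict Int Int) (x c : Int) (hx : (x, c) ∈ d.items) :
    d.contains x = true := by
  unfold PySem.Dict.contains
  simp only [List.any_eq_true]
  exact ⟨(x, c), hx, by simp⟩

lemma nAt_insert_of_mem (d : PySem.Dict Int Int) (x c v j : Int)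
    (hnd : d.keys.Nodup) (hx : (x, c) ∈ d.items) :
    nAt (d.insert x v) j + (if c = j then 1 else 0) = nAt d j + (if v = j then 1 else 0) := by
  unfold nAt PySem.Dict.insert
  rw [if_pos (contains_of_mem_items d x c hx)]
  exact replCount x c v j d.items (keys_nodup_map_fst d hnd) hx

lemma nAt_erase_of_mem (d : PySem.Dict Int Int) (x c j : Int)
    (hnd : d.keys.Nodup) (hx : (x, c) ∈ d.items) :
    nAt (d.erase x) j + (if c = j then 1 else 0) = nAt d j := by
  unfold nAt PySem.Dict.erase
  exact delCount x c j d.items (keys_nodup_map_fst d hnd) hx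

lemma getD_nonneg_of_inv (freq cnt cc : PySem.Dict Int Int) (maxc x : Int)
    (h : SimInv freq cnt cc maxc) : 0 ≤ freq.getD x 0 := by
  by_cases hz : freq.getD x 0 = 0
  · omega
  · have hv := getD_mem_values freq x hz
    have hpos := (mem_values_iff_nAt_pos freq _).mp hv
    have := h.2.2.1 (freq.getD x 0)
    by_contra hneg
    have : nAt freq (freq.getD x 0) = 0 := h.2.2.1 _ (by omega)
    omega

lemma maxc_nonneg_of_inv (freq cnt cc : PySem.Dict Int Int) (maxc : Int)
    (h : SimInv freq cnt cc maxc) : 0 ≤ maxc := by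
  by_cases hne : freq.items = []
  · have := h.2.2.2.2.1 hne; omega
  · have hpos := h.2.2.2.2.2.1 hne
    by_contra hneg
    have := h.2.2.1 maxc (by omega)
    omega

lemma values_ne_nil (d : PySem.Dict Int Int) (h : d.items ≠ []) : d.values ≠ [] := by
  unfold PySem.Dict.values
  simpa using h

lemma aMax_eq_maxc (freq cnt cc : PySem.Dict Int Int) (maxc : Int)
    (h : SimInv freq cnt cc maxc) (hne : freq.items ≠ []) :
    aMax freq = some maxc := by
  unfold aMax
  cases hm : PySem.List.max? freq.values (fun v => v) with
  | none =>
    exact absurd (((PySem.List.max?_eq_none_iff _ _).mp hm)) (values_ne_nil freq hne)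
  | some m =>
    have hmem := PySem.List.max?_mem hm
    have hisMax := PySem.List.max?_isMax hm
    have hmle : m ≤ maxc := by
      have hp := (mem_values_iff_nAt_pos freq m).mp hmem
      by_contra hgt
      have := h.2.2.2.1 m (by omega)
      omega
    have hmaxmem : maxc ∈ freq.values :=
      (mem_values_iff_nAt_pos freq maxc).mpr (h.2.2.2.2.2.1 hne)
    have := hisMax maxc hmaxmem
    simp only [Option.some.injEq]
    omega

lemma nAt_pos_of_getD (freq : PySem.Dict Int Int) (x : Int) (h : freq.getD x 0 ≠ 0) :
    0 < nAt freq (freq.getD x 0) :=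
  (mem_values_iff_nAt_pos freq _).mp (getD_mem_values freq x h)

lemma sim_incr (freq cnt cc : PySem.Dict Int Int) (maxc x : Int)
    (h : SimInv freq cnt cc maxc) :
    SimInv (freq.insert x (freq.getD x 0 + 1)) (cnt.insert x (freq.getD x 0 + 1))
      ((if freq.getD x 0 > 0 then
          cc.insert (freq.getD x 0) (cc.getD (freq.getD x 0) 0 - 1) else cc).insert
        (freq.getD x 0 + 1)
        ((if freq.getD x 0 > 0 then
            cc.insert (freq.getD x 0) (cc.getD (freq.getD x 0) 0 - 1) else cc).getD
          (freq.getD x 0 + 1) 0 + 1))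
      (if freq.getD x 0 + 1 > maxc then freq.getD x 0 + 1 else maxc) := by
  obtain ⟨hnd, hag, hpos, hbnd, hemp, hatt, hcc⟩ := h
  have hInv : SimInv freq cnt cc maxc := ⟨hnd, hag, hpos, hbnd, hemp, hatt, hcc⟩
  set c := freq.getD x 0 with hcdef
  have hc0 : 0 ≤ c := getD_nonneg_of_inv freq cnt cc maxc x hInv
  have hm0 : 0 ≤ maxc := maxc_nonneg_of_inv freq cnt cc maxc hInv
  have hrel : ∀ j, (nAt (freq.insert x (c + 1)) j : Int) + (if 0 < c ∧ c = j then 1 else 0)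
      = (nAt freq j : Int) + (if c + 1 = j then 1 else 0) := by
    intro j
    by_cases hcz : 0 < c
    · have hg := get?_of_getD_ne freq x (by omega)
      rw [← hcdef] at hg
      have hmem := PySem.Dict.mem_items_of_get?_eq_some freq hg
      have := nAt_insert_of_mem freq x c (c + 1) j hnd hmem
      simp only [hcz, true_and]
      split_ifs at this ⊢ <;> push_cast <;> omega
    · have hz : c = 0 := by omega
      have hnc : freq.contains x = false := by
        cases hgg : freq.get? x with
        | none => rw [PySem.Dict.contains_eq_isSome_get?, hgg]; rfl
        | some v =>
          exfalso
          have : freq.getD x 0 = v := PySem.Dict.getD_of_get?_eq_some freq 0 hgg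
          have hv0 : v = 0 := by omega
          have := nAt_pos_of_getD freq x
          rw [← hcdef] at *
          have h1 : (0:Int) < 0 ∨ True := Or.inr trivial
          have := hpos 0 le_rfl
          -- v = 0 stored means nAt freq 0 > 0 contradicting hpos
          have hmem := PySem.Dict.mem_items_of_get?_eq_some freq hgg
          have : (0:Int) ∈ freq.values := by
            rw [hv0] at hmem
            exact List.mem_map_of_mem hmem
          have := (mem_values_iff_nAt_pos freq 0).mp this
          omega
      have := nAt_insert_of_not_contains freq x (c + 1) j hnc
      simp only [hcz, false_and, if_false]
      split_ifs at this ⊢ <;> push_cast <;> omega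
  have hcle : 0 < c → c ≤ maxc := by
    intro hcz
    have := nAt_pos_of_getD freq x (by omega)
    rw [← hcdef] at this
    by_contra hgt
    have := hbnd c (by omega)
    omega
  have hattI : freq.items ≠ [] → (0:Int) < nAt freq maxc := by
    intro hne; exact_mod_cast hatt hne
  refine ⟨PySem.Dict.nodup_keys_insert _ _ _ hnd, ?_, ?_, ?_, ?_, ?_, ?_⟩
  · intro x'
    rw [PySem.Dict.getD_insert, PySem.Dict.getD_insert]
    split_ifs with h'
    · rfl
    · exact hag x'
  · intro j hj
    have h1 := hrel j
    have h2 := hpos j hj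
    split_ifs at h1 <;> omega
  · intro j hj
    have h1 := hrel j
    by_cases hgt : c + 1 > maxc
    · rw [if_pos hgt] at hj
      have h2 := hbnd j (by omega)
      split_ifs at h1 <;> omega
    · rw [if_neg hgt] at hj
      have h2 := hbnd j (by omega)
      split_ifs at h1 <;> omega
  · intro habs; exact absurd habs (insert_items_ne_nil freq x (c + 1))
  · intro _
    by_cases hgt : c + 1 > maxc
    · rw [if_pos hgt]
      have h1 := hrel (c + 1)
      split_ifs at h1 <;> omega
    · rw [if_neg hgt]
      have hne : freq.items ≠ [] := by
        intro hnil
        have := hemp hnil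
        omega
      have h1 := hrel maxc
      have h2 := hattI hne
      split_ifs at h1 <;> omega
  · intro j hj
    rw [PySem.Dict.getD_insert]
    have h1 := hrel j
    by_cases hj1 : j = c + 1
    · rw [if_pos hj1]
      have hgetc1 : (if c > 0 then cc.insert c (cc.getD c 0 - 1) else cc).getD (c + 1) 0
          = cc.getD (c + 1) 0 := by
        split_ifs with hcz
        · rw [PySem.Dict.getD_insert, if_neg (by omega)]
        · rfl
      rw [hgetc1, hcc (c + 1) (by omega)]
      subst hj1
      split_ifs at h1 <;> omega
    · rw [if_neg hj1]
      by_cases hcz : c > 0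
      · rw [if_pos hcz, PySem.Dict.getD_insert]
        by_cases hjc : j = c
        · rw [if_pos hjc, hcc c (by omega)]
          have hp := nAt_pos_of_getD freq x (by omega)
          rw [← hcdef] at hp
          subst hjc
          split_ifs at h1 <;> omega
        · rw [if_neg hjc, hcc j hj]
          split_ifs at h1 <;> omega
      · rw [if_neg hcz, hcc j hj]
        split_ifs at h1 <;> omega

lemma nAt_of_items_nil (d : PySem.Dict Int Int) (h : d.items = []) (j : Int) : nAt d j = 0 := by
  simp [nAt, h]

lemma sim_decr (freq cnt cc : PySem.Dict Int Int) (maxc y : Int)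
    (h : SimInv freq cnt cc maxc) (hd : 1 ≤ freq.getD y 0) :
    SimInv
      (if freq.getD y 0 - 1 = 0 then freq.erase y else freq.insert y (freq.getD y 0 - 1))
      (cnt.insert y (freq.getD y 0 - 1))
      (if freq.getD y 0 > 1 then
        (cc.insert (freq.getD y 0) (cc.getD (freq.getD y 0) 0 - 1)).insert (freq.getD y 0 - 1)
          ((cc.insert (freq.getD y 0) (cc.getD (freq.getD y 0) 0 - 1)).getD (freq.getD y 0 - 1) 0 + 1)
       else cc.insert (freq.getD y 0) (cc.getD (freq.getD y 0) 0 - 1))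
      (if freq.getD y 0 = maxc ∧
          ((if freq.getD y 0 > 1 then
            (cc.insert (freq.getD y 0) (cc.getD (freq.getD y 0) 0 - 1)).insert (freq.getD y 0 - 1)
              ((cc.insert (freq.getD y 0) (cc.getD (freq.getD y 0) 0 - 1)).getD (freq.getD y 0 - 1) 0 + 1)
           else cc.insert (freq.getD y 0) (cc.getD (freq.getD y 0) 0 - 1))).getD (freq.getD y 0) 0 = 0
        then maxc - 1 else maxc) := by
  obtain ⟨hnd, hag, hpos, hbnd, hemp, hatt, hcc⟩ := h
  have hInv : SimInv freq cnt cc maxc := ⟨hnd, hag, hpos, hbnd, hemp, hatt, hcc⟩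
  set d := freq.getD y 0 with hddef
  have hg : freq.get? y = some d := by
    rw [hddef]; exact get?_of_getD_ne freq y (by omega)
  have hmem := PySem.Dict.mem_items_of_get?_eq_some freq hg
  have hne : freq.items ≠ [] := List.ne_nil_of_mem hmem
  have hdIn : 0 < nAt freq d := by
    have := nAt_pos_of_getD freq y (by omega); rwa [← hddef] at this
  have hdle : d ≤ maxc := by
    by_contra hgt; have := hbnd d (by omega); omega
  set freq2 := (if d - 1 = 0 then freq.erase y else freq.insert y (d - 1)) with hf2
  set cc2 := (if d > 1 then
        (cc.insert d (cc.getD d 0 - 1)).insert (d - 1)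
          ((cc.insert d (cc.getD d 0 - 1)).getD (d - 1) 0 + 1)
       else cc.insert d (cc.getD d 0 - 1)) with hcc2
  have hrel : ∀ j, (nAt freq2 j : Int) + (if d = j then 1 else 0)
      = (nAt freq j : Int) + (if 1 < d ∧ d - 1 = j then 1 else 0) := by
    intro j
    rw [hf2]
    by_cases h1 : d - 1 = 0
    · rw [if_pos h1]
      have := nAt_erase_of_mem freq y d j hnd hmem
      have hd1 : ¬ (1 < d) := by omega
      simp only [hd1, false_and, if_false]
      split_ifs at this ⊢ <;> push_cast <;> omega
    · rw [if_neg h1]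
      have := nAt_insert_of_mem freq y d (d - 1) j hnd hmem
      have hd1 : 1 < d := by omega
      simp only [hd1, true_and]
      split_ifs at this ⊢ <;> push_cast <;> omega
  have hccgood : ∀ j : Int, 1 ≤ j → cc2.getD j 0 = (nAt freq2 j : Int) := by
    intro j hj
    rw [hcc2]
    have h1 := hrel j
    by_cases hd1 : d > 1
    · rw [if_pos hd1, PySem.Dict.getD_insert]
      by_cases hjd1 : j = d - 1
      · rw [if_pos hjd1, PySem.Dict.getD_insert, if_neg (by omega), hcc (d - 1) (by omega)]
        subst hjd1
        split_ifs at h1 <;> omega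
      · rw [if_neg hjd1, PySem.Dict.getD_insert]
        by_cases hjd : j = d
        · rw [if_pos hjd, hcc d (by omega)]
          subst hjd
          split_ifs at h1 <;> omega
        · rw [if_neg hjd, hcc j hj]
          split_ifs at h1 <;> omega
    · rw [if_neg hd1, PySem.Dict.getD_insert]
      by_cases hjd : j = d
      · rw [if_pos hjd, hcc d (by omega)]
        subst hjd
        split_ifs at h1 <;> omega
      · rw [if_neg hjd, hcc j hj]
        split_ifs at h1 <;> omega
  have hnd2 : freq2.keys.Nodup := by
    rw [hf2]; split_ifs
    · exact nodup_keys_erase freq y hnd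
    · exact PySem.Dict.nodup_keys_insert _ _ _ hnd
  have hag2 : ∀ x, freq2.getD x 0 = (cnt.insert y (d - 1)).getD x 0 := by
    intro x'
    rw [PySem.Dict.getD_insert]
    by_cases hx' : x' = y
    · rw [if_pos hx']
      subst hx'
      rw [hf2]; split_ifs with h1
      · rw [PySem.Dict.getD_eq_get?_getD, get?_erase_self]
        simp; omega
      · rw [PySem.Dict.getD_insert, if_pos rfl]
    · rw [if_neg hx']
      rw [hf2]; split_ifs with h1
      · rw [PySem.Dict.getD_eq_get?_getD, get?_erase_of_ne freq y x' hx',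
          ← PySem.Dict.getD_eq_get?_getD]
        exact hag x'
      · rw [PySem.Dict.getD_insert, if_neg hx']
        exact hag x'
  have hpos2 : ∀ j : Int, j ≤ 0 → nAt freq2 j = 0 := by
    intro j hj
    have h1 := hrel j
    have h2 := hpos j hj
    split_ifs at h1 <;> omega
  set E := cc2.getD d 0 with hE
  have hEeq : E = (nAt freq2 d : Int) := hccgood d (by omega)
  by_cases hcond : d = maxc ∧ E = 0
  · rw [if_pos hcond]
    obtain ⟨hdm, hE0⟩ := hcond
    have hnAt2d : nAt freq2 d = 0 := by omega
    refine ⟨hnd2, hag2, hpos2, ?_, ?_, ?_, hccgood⟩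
    · intro j hj
      by_cases hjm : j = maxc
      · subst hjm; rw [← hdm]; exact hnAt2d
      · have h1 := hrel j
        have h2 := hbnd j (by omega)
        split_ifs at h1 <;> omega
    · intro hnil2
      by_cases hd1 : 1 < d
      · exfalso
        rw [hf2, if_neg (by omega)] at hnil2
        exact insert_items_ne_nil freq y (d - 1) hnil2
      · omega
    · intro hne2
      by_cases hd1 : 1 < d
      · have h1 := hrel (d - 1)
        have : 0 < nAt freq2 (maxc - 1) := by
          rw [← hdm]
          split_ifs at h1 <;> omega
        exact this
      · exfalso
        have hd1' : d = 1 := by omega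
        apply hne2
        apply items_eq_nil_of_nAt
        intro j
        by_cases hjle : j ≤ 0
        · exact hpos2 j hjle
        · by_cases hjd : j = d
          · subst hjd; exact hnAt2d
          · have h1 := hrel j
            have h2 := hbnd j (by omega)
            split_ifs at h1 <;> omega
  · rw [if_neg hcond]
    have hcond' : d = maxc → nAt freq2 d ≠ 0 := by
      intro hdm hz
      exact hcond ⟨hdm, by omega⟩
    refine ⟨hnd2, hag2, hpos2, ?_, ?_, ?_, hccgood⟩
    · intro j hj
      have h1 := hrel j
      have h2 := hbnd j hj
      split_ifs at h1 <;> omega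
    · intro hnil2
      exfalso
      by_cases hdm : d = maxc
      · exact hcond' hdm (nAt_of_items_nil _ hnil2 d)
      · have h1 := hrel maxc
        have h2 := hatt hne
        have h3 := nAt_of_items_nil _ hnil2 maxc
        split_ifs at h1 <;> omega
    · intro _
      by_cases hdm : d = maxc
      · have := hcond' hdm
        rw [← hdm]
        omega
      · have h1 := hrel maxc
        have h2 := hatt hne
        split_ifs at h1 <;> omega

lemma bWhile_stop (speed : List Int) (k e : Int) (fuel : Nat) (s : Int)
    (cnt cc : PySem.Dict Int Int) (mc : Int) (h : ¬ e - s + 1 - mc > k) :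
    bWhile speed k e fuel s cnt cc mc = (s, cnt, cc, mc) := by
  cases fuel with
  | zero => rfl
  | succ f => rw [bWhile, if_neg h]

lemma winL_step (speed : List Int) (m : Nat) (start : Int)
    (h0 : 0 ≤ start) (h1 : start ≤ (m : Int)) (hm : m < speed.length) :
    ∃ y, PySem.List.pyGet? speed start = some y ∧
      winL speed (m + 1) start = y :: winL speed (m + 1) (start + 1) := by
  refine ⟨speed[start.toNat]'(by omega), ?_, ?_⟩
  · exact PySem.List.pyGet?_eq_some_getElem speed h0 (by omega)
  · unfold winL
    have hlt : start.toNat < (speed.take (m + 1)).length := by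
      rw [List.length_take]; omega
    rw [List.drop_eq_getElem_cons hlt]
    congr 1
    · exact List.getElem_take
    · congr 1
      omega

lemma winL_nil_of_counts (speed : List Int) (m : Nat) (s : Int)
    (h : ∀ x, ((winL speed m s).count x : Int) = 0) : winL speed m s = [] := by
  cases hw : winL speed m s with
  | nil => rfl
  | cons a t =>
    have := h a
    rw [hw] at this
    simp [List.count_cons] at this
    omega

-- lockstep simulation of the two inner while loops
lemma whileSim (speed : List Int) (k : Int) (hk : 0 ≤ k) (m : Nat) (hm : m < speed.length) :
    ∀ (fuel : Nat) (start : Int) (freq cnt cc : PySem.Dict Int Int) (maxc : Int),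
    SimInv freq cnt cc maxc →
    (∀ x, freq.getD x 0 = ((winL speed (m + 1) start).count x : Int)) →
    0 ≤ start → start ≤ (m : Int) + 1 →
    ∃ start2 freq2 cnt2 cc2 maxc2,
      aWhile speed k (m : Int) fuel start freq maxc = (start2, freq2) ∧
      bWhile speed k (m : Int) fuel start cnt cc maxc = (start2, cnt2, cc2, maxc2) ∧
      SimInv freq2 cnt2 cc2 maxc2 ∧
      (∀ x, freq2.getD x 0 = ((winL speed (m + 1) start2).count x : Int)) ∧
      0 ≤ start2 ∧ start2 ≤ (m : Int) + 1 := by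
  intro fuel
  induction fuel with
  | zero =>
    intro start freq cnt cc maxc hInv hwin h0 h1
    exact ⟨start, freq, cnt, cc, maxc, rfl, rfl, hInv, hwin, h0, h1⟩
  | succ f ih =>
    intro start freq cnt cc maxc hInv hwin h0 h1
    by_cases hcond : (m : Int) - start + 1 - maxc > k
    · -- both loops iterate
      have hmc0 : 0 ≤ maxc := maxc_nonneg_of_inv freq cnt cc maxc hInv
      have hsm : start ≤ (m : Int) := by omega
      obtain ⟨y, hyget, hwcons⟩ := winL_step speed m start h0 hsm hm
      have hag := hInv.2.1
      have hd1 : 1 ≤ freq.getD y 0 := by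
        rw [hwin y, hwcons]
        simp
      have hdec := sim_decr freq cnt cc maxc y hInv hd1
      rw [aWhile, if_pos hcond, bWhile, if_pos hcond, hyget]
      simp only [Option.getD_some, ← hag y]
      have hwin2 : ∀ x,
          (if freq.getD y 0 - 1 = 0 then freq.erase y
           else freq.insert y (freq.getD y 0 - 1)).getD x 0
            = ((winL speed (m + 1) (start + 1)).count x : Int) := by
        intro x
        have hcnt := hwin x
        rw [hwcons] at hcnt
        by_cases hxy : x = y
        · subst hxy
          split_ifs with hbr
          · rw [PySem.Dict.getD_eq_get?_getD, get?_erase_self]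
            simp only [Option.getD_none]
            simp at hcnt
            omega
          · rw [PySem.Dict.getD_insert, if_pos rfl]
            simp at hcnt
            omega
        · have hcc' : ((winL speed (m + 1) (start + 1)).count x : Int)
              = ((y :: winL speed (m + 1) (start + 1)).count x : Int) := by
            rw [List.count_cons]
            simp [beq_eq_false_iff_ne.mpr (fun h => hxy h.symm)]
          rw [hcc', ← hcnt]
          split_ifs with hbr
          · rw [PySem.Dict.getD_eq_get?_getD, get?_erase_of_ne freq y x hxy,
              ← PySem.Dict.getD_eq_get?_getD]
          · rw [PySem.Dict.getD_insert, if_neg hxy]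
      by_cases hnil2 : (if freq.getD y 0 - 1 = 0 then freq.erase y
          else freq.insert y (freq.getD y 0 - 1)).items = []
      · -- the window became empty: A's max() would raise, but this needs start = m and then
        -- both loops stop with the same state (k ≥ 0 keeps B's condition false)
        have hmax0 := hdec.2.2.2.2.1 hnil2
        have hwnil : winL speed (m + 1) (start + 1) = [] := by
          apply winL_nil_of_counts
          intro x
          rw [← hwin2 x, getD_of_items_eq_nil _ hnil2 x]
        have hstart : start = (m : Int) := by
          unfold winL at hwnil
          rw [List.drop_eq_nil_iff] at hwnil
          rw [List.length_take] at hwnil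
          omega
        have hvnil : (if freq.getD y 0 - 1 = 0 then freq.erase y
            else freq.insert y (freq.getD y 0 - 1)).values = [] := by
          simp [PySem.Dict.values, hnil2]
        have hamax : aMax (if freq.getD y 0 - 1 = 0 then freq.erase y
            else freq.insert y (freq.getD y 0 - 1)) = none := by
          unfold aMax
          rw [hvnil]
          exact (PySem.List.max?_eq_none_iff _ _).mpr rfl
        rw [hamax]
        rw [bWhile_stop speed k m f (start + 1) _ _ _ (by omega)]
        refine ⟨start + 1, _, _, _, _, rfl, rfl, hdec, ?_, by omega, by omega⟩
        intro x
        rw [hwin2 x]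
      · rw [aMax_eq_maxc _ _ _ _ hdec hnil2]
        exact ih (start + 1) _ _ _ _ hdec hwin2 (by omega) (by omega)
    · -- both loops stop
      rw [bWhile_stop speed k m (f + 1) start cnt cc maxc hcond]
      refine ⟨start, freq, cnt, cc, maxc, ?_, rfl, hInv, hwin, h0, h1⟩
      rw [aWhile, if_neg hcond]

lemma simInv_empty : SimInv PySem.Dict.empty PySem.Dict.empty PySem.Dict.empty 0 := by
  refine ⟨?_, ?_, ?_, ?_, ?_, ?_, ?_⟩ <;>
    simp [PySem.Dict.empty, PySem.Dict.keys, PySem.Dict.getD, PySem.Dict.get?, nAt]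

lemma winL_snoc (speed : List Int) (m : Nat) (start : Int) (y : Int)
    (h0 : 0 ≤ start) (h1 : start ≤ (m : Int)) (hm : m < speed.length)
    (hy : PySem.List.pyGet? speed (m : Int) = some y) :
    winL speed (m + 1) start = winL speed m start ++ [y] := by
  have hyv : speed[m]'hm = y := by
    rw [PySem.List.pyGet?_eq_some_getElem speed (by omega) (by omega)] at hy
    simp only [Option.some.injEq] at hy
    simpa using hy
  unfold winL
  rw [List.take_add_one, List.getElem?_eq_getElem hm]
  simp only [Option.toList_some]
  rw [List.drop_append_of_le_length (by rw [List.length_take]; omega), hyv]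

-- lockstep simulation of the outer for loops
lemma outerSim (speed : List Int) (k : Int) (hk : 0 ≤ k) (m : Nat) (hm : m ≤ speed.length) :
    ∃ start freq cnt cc maxc best,
      (List.range m).foldl (fun st (e : Nat) => aStep speed k st (e : Int)) (0, PySem.Dict.empty, 0)
        = (start, freq, best) ∧
      (List.range m).foldl (fun st (e : Nat) => bStep speed k st (e : Int))
          (0, PySem.Dict.empty, PySem.Dict.empty, 0, 0)
        = (start, cnt, cc, maxc, best) ∧
      SimInv freq cnt cc maxc ∧
      (∀ x, freq.getD x 0 = ((winL speed m start).count x : Int)) ∧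
      0 ≤ start ∧ start ≤ (m : Int) := by
  induction m with
  | zero =>
    refine ⟨0, PySem.Dict.empty, PySem.Dict.empty, PySem.Dict.empty, 0, 0, rfl, rfl,
      simInv_empty, ?_, le_rfl, le_rfl⟩
    intro x
    simp [winL, PySem.Dict.getD, PySem.Dict.get?, PySem.Dict.empty]
  | succ m ihm =>
    have hmlt : m < speed.length := by omega
    obtain ⟨start, freq, cnt, cc, maxc, best, hA, hB, hInv, hwin, h0, h1⟩ := ihm (by omega)
    obtain ⟨y, hyget⟩ : ∃ y, PySem.List.pyGet? speed (m : Int) = some y :=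
      ⟨speed[m]'hmlt, PySem.List.pyGet?_eq_some_getElem speed (by omega) (by omega)⟩
    have hsnoc := winL_snoc speed m start y h0 h1 hmlt hyget
    simp only [List.range_succ, List.foldl_append, List.foldl_cons, List.foldl_nil, hA, hB]
    unfold aStep bStep
    dsimp only
    rw [hyget]
    simp only [Option.getD_some, ← hInv.2.1 y]
    have hinc := sim_incr freq cnt cc maxc y hInv
    rw [aMax_eq_maxc _ _ _ _ hinc (insert_items_ne_nil freq y _)]
    simp only [Option.getD_some]
    have hwin1 : ∀ x, (freq.insert y (freq.getD y 0 + 1)).getD x 0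
        = ((winL speed (m + 1) start).count x : Int) := by
      intro x
      rw [hsnoc, PySem.Dict.getD_insert]
      by_cases hxy : x = y
      · subst hxy
        rw [if_pos rfl, hwin x]
        simp [List.count_append]
      · rw [if_neg hxy, hwin x]
        simp [List.count_append, List.count_cons, beq_eq_false_iff_ne.mpr (fun h => hxy h.symm)]
    obtain ⟨start2, freq2, cnt2, cc2, maxc2, hAw, hBw, hInv2, hwin2, h02, h12⟩ :=
      whileSim speed k hk m hmlt ((m : Int) + 1 - start).toNat start
        (freq.insert y (freq.getD y 0 + 1)) _ _ _ hinc hwin1 h0 (by omega)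
    rw [hAw, hBw]
    dsimp only
    refine ⟨start2, freq2, cnt2, cc2, maxc2, max best ((m : Int) - start2 + 1), rfl, ?_, hInv2,
      ?_, h02, by push_cast; omega⟩
    · rw [max_def_lt]
    · intro x
      exact hwin2 x

-- ===== VERDICT (by name: the statement is the Claim_ definition above) =====
theorem getMaxRacers_spec : Claim_equal_getMaxRacers := by
  intro speed k _hdom hpre
  unfold Spec_getMaxRacers
  rcases hpre with hk | hnil
  · obtain ⟨start, freq, cnt, cc, maxc, best, hA, hB, -, -, -, -⟩ :=
      outerSim speed k hk speed.length le_rfl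
    unfold getMaxRacers getMaxRacers_alt
    simp only [PySem.List.pyRange_zero_natCast, List.foldl_map, hA, hB]
  · subst hnil; rfl
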